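-- pv_equiv track=rewrite | github.com/haokaibo/PythonPractice | google/circular_array.py | check_circular_array
-- ===== SOURCE A (Python) =====
-- def check_circular_array(arr):
--     '''
--     Time complexity is O(n).
--     :param arr:
--     :return:
--     '''
--     if arr is None:
--         return False
--
--     p = q = 0
--     arr_len = len(arr)
--
--     if arr_len <= 1:
--         return False
--
--     while True:
--         if 0 <= p < arr_len and 0 <= q < arr_len:
--             p = arr[p]
--             if 0 <= p < arr_len:
--                 if p == q:
--                     return True
--                 else:
--                     p = arr[p]
--                     if 0 <= p < arr_len:
--                         if p == q:
--                             return True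
--                         else:
--                             q = arr[q]
--                             if p == q:
--                                 return True
--                     else:
--                         return False
--             else:
--                 return False
--         else:
--             return False
-- ===== SOURCE B (Python) =====
-- def check_circular_array(arr):
--     if arr is None:
--         return False
--     n = len(arr)
--     if n <= 1:
--         return False
--     seen = set()
--     cur = 0
--     while True:
--         if not (0 <= cur < n):
--             return False
--         if cur in seen:
--             return True
--         seen.add(cur)
--         cur = arr[cur]
-- ===== Notes on version B (the rewrite author's own statement) =====
-- stated objective: simpler
-- what changed: B replaces Floyd's two-pointer race (hare two steps, tortoise one, three equality checks per iteration) with a single walk from index 0 that records visited indices in a set and reports a cycle on the first revisit.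
import Mathlib
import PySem

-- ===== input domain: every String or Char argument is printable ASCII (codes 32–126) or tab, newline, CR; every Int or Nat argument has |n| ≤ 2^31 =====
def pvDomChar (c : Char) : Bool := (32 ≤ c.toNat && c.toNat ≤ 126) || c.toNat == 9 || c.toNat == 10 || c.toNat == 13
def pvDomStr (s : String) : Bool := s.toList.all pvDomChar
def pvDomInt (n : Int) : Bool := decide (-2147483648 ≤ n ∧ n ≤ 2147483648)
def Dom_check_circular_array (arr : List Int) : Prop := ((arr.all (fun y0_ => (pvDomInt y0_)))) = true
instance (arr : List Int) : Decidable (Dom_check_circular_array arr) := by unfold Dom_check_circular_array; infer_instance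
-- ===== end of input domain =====

-- B replaces Floyd's two-pointer race with a single visited-set walk from index 0; same True/False result, proved equal below.
-- (The Python guard 'arr is None' has no counterpart for 'List Int' and is dropped in both ports.)

-- arr[i] for an index the surrounding code has already checked to satisfy 0 ≤ i < len (exact there; shared by both ports)
def pyAt (arr : List Int) (i : Int) : Int := (PySem.List.pyGet? arr i).getD 0

-- ===== PORT A =====
-- 'while True' loop of A as fuel recursion; the fuel (len+1)^2 provably suffices (lemmas below), 0 is never returned by it
def aLoop (arr : List Int) (n : Int) : Nat → Int → Int → Bool
  | 0, _, _ => false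
  | fuel+1, p, q =>
    if 0 ≤ p ∧ p < n ∧ 0 ≤ q ∧ q < n then
      let p1 := pyAt arr p
      if 0 ≤ p1 ∧ p1 < n then
        if p1 = q then true
        else
          let p2 := pyAt arr p1
          if 0 ≤ p2 ∧ p2 < n then
            if p2 = q then true
            else
              let q1 := pyAt arr q
              if p2 = q1 then true
              else aLoop arr n fuel p2 q1
          else false
      else false
    else false

def check_circular_array (arr : List Int) : Bool :=
  let n : Int := arr.length
  if n ≤ 1 then false
  else aLoop arr n ((arr.length + 1) * (arr.length + 1)) 0 0

-- ===== PORT B =====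
-- B's 'while True' loop as fuel recursion (same provably sufficient fuel bound)
def bLoop (arr : List Int) (n : Int) : Nat → PySem.Set Int → Int → Bool
  | 0, _, _ => false
  | fuel+1, seen, cur =>
    if ¬ (0 ≤ cur ∧ cur < n) then false
    else if PySem.Set.contains seen cur then true
    else bLoop arr n fuel (PySem.Set.add seen cur) (pyAt arr cur)

def check_circular_array_alt (arr : List Int) : Bool :=
  let n : Int := arr.length
  if n ≤ 1 then false
  else bLoop arr n ((arr.length + 1) * (arr.length + 1)) PySem.Set.empty 0

-- ===== PRECONDITION & SPEC =====
def Spec_check_circular_array (arr : List Int) (out : Bool) : Prop := out = check_circular_array_alt arr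
instance (arr : List Int) (out : Bool) : Decidable (Spec_check_circular_array arr out) := by unfold Spec_check_circular_array; infer_instance

-- ===== CLAIM (what is proved, stated in full; the proofs are below) =====
def Claim_equal_check_circular_array : Prop := ∀ (arr : List Int), Dom_check_circular_array arr → Spec_check_circular_array arr (check_circular_array arr)

-- ===== LEMMAS AND PROOFS =====

-- the index walk both programs follow: pos k = the k-th index visited from 0, none once it leaves [0, len)
def pvStep (arr : List Int) (i : Int) : Option Int :=
  if 0 ≤ pyAt arr i ∧ pyAt arr i < (arr.length : Int) then some (pyAt arr i) else none

def pos (arr : List Int) : Nat → Option Int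
  | 0 => some 0
  | k+1 => (pos arr k).bind (pvStep arr)

theorem pos_inb (arr : List Int) (hn : 1 ≤ arr.length) :
    ∀ k v, pos arr k = some v → 0 ≤ v ∧ v < (arr.length : Int) := by
  intro k
  induction k with
  | zero => intro v h; simp [pos] at h; omega
  | succ k ih =>
    intro v h
    rw [pos] at h
    cases hu : pos arr k with
    | none => rw [hu] at h; simp at h
    | some u =>
      rw [hu] at h
      simp only [Option.bind_some, pvStep] at h
      split at h
      · cases h; assumption
      · simp at h

theorem pos_succ_some (arr : List Int) (k : Nat) (v : Int)
    (hk : pos arr k = some v) (hs : (pos arr (k+1)).isSome) :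
    pos arr (k+1) = some (pyAt arr v) ∧
      (0 ≤ pyAt arr v ∧ pyAt arr v < (arr.length : Int)) := by
  have : pos arr (k+1) = pvStep arr v := by simp [pos, hk]
  rw [this] at hs ⊢
  unfold pvStep at hs ⊢
  split at hs
  · simp; assumption
  · simp at hs

theorem pos_succ_none (arr : List Int) (k : Nat) (v : Int)
    (hk : pos arr k = some v) (hs : pos arr (k+1) = none) :
    ¬ (0 ≤ pyAt arr v ∧ pyAt arr v < (arr.length : Int)) := by
  have : pos arr (k+1) = pvStep arr v := by simp [pos, hk]
  rw [this] at hs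
  unfold pvStep at hs
  split at hs
  · simp at hs
  · assumption

theorem pos_none_mono (arr : List Int) (k l : Nat) (hk : pos arr k = none) (hkl : k ≤ l) :
    pos arr l = none := by
  induction l with
  | zero =>
    have h0 : k = 0 := Nat.le_zero.mp hkl
    subst h0; exact hk
  | succ l ih =>
    rcases Nat.lt_or_ge k (l+1) with h | h
    · have := ih (by omega)
      simp [pos, this]
    · have : k = l + 1 := by omega
      exact this ▸ hk

theorem pos_lt_of_some (arr : List Int) (k m : Nat) (hm : pos arr m = none)
    (hk : (pos arr k).isSome) : k < m := by
  by_contra h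
  have := pos_none_mono arr m k hm (by omega)
  simp [this] at hk

theorem pos_shift (arr : List Int) (a b : Nat) (hab : pos arr a = pos arr b) :
    ∀ r, pos arr (a + r) = pos arr (b + r) := by
  intro r
  induction r with
  | zero => simpa using hab
  | succ r ih => simp [pos, ih]

theorem pos_all_some_of_repeat (arr : List Int) (a b : Nat) (hab : a < b)
    (heq : pos arr a = pos arr b) (hsome : (pos arr a).isSome) :
    ∀ k, (pos arr k).isSome := by
  intro k
  induction k using Nat.strong_induction_on with
  | _ k ih =>
    rcases Nat.lt_or_ge k (b+1) with h | h
    · -- k ≤ b : pos b is some, so earlier positions are some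
      by_contra hnone
      have h1 : pos arr k = none := by
        cases hpk : pos arr k <;> simp [hpk] at hnone ⊢
      have := pos_none_mono arr k b h1 (by omega)
      rw [heq, this] at hsome; simp at hsome
    · -- k > b : pos k = pos (k - (b-a)), strictly smaller
      have h2 : pos arr (a + (k - b)) = pos arr (b + (k - b)) := pos_shift arr a b heq (k - b)
      have h3 : b + (k - b) = k := by omega
      rw [h3] at h2
      have := ih (a + (k - b)) (by omega)
      rw [h2] at this
      exact this

theorem pos_inj (arr : List Int) (m : Nat) (hm : pos arr m = none) :
    ∀ u v x, u < v → pos arr u = some x → pos arr v = some x → False := by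
  intro u v x huv hu hv
  have := pos_all_some_of_repeat arr u v huv (hu.trans hv.symm) (by simp [hu]) m
  simp [hm] at this

theorem pos_pigeonhole (arr : List Int) (hn : 1 ≤ arr.length)
    (hall : ∀ k, k ≤ arr.length → (pos arr k).isSome) :
    ∃ a b, a < b ∧ b ≤ arr.length ∧ pos arr a = pos arr b := by
  have hmap : ∀ k ∈ Finset.range (arr.length + 1),
      ((pos arr k).getD 0).toNat ∈ Finset.range arr.length := by
    intro k hk
    simp [Finset.mem_range] at hk ⊢
    have := hall k (by omega)
    cases hpk : pos arr k with
    | none => simp [hpk] at this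
    | some v =>
      have hb := pos_inb arr hn k v hpk
      simp; omega
  obtain ⟨a, ha, b, hb, hne, hfe⟩ :=
    Finset.exists_ne_map_eq_of_card_lt_of_maps_to (by simp) hmap
  have key : ∀ x y : Nat, x ≤ arr.length → y ≤ arr.length →
      ((pos arr x).getD 0).toNat = ((pos arr y).getD 0).toNat → pos arr x = pos arr y := by
    intro x y hx hy h
    have hx' := hall x hx; have hy' := hall y hy
    cases hpx : pos arr x with
    | none => simp [hpx] at hx'
    | some vx =>
      cases hpy : pos arr y with
      | none => simp [hpy] at hy'
      | some vy =>
        have bx := pos_inb arr hn x vx hpx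
        have by' := pos_inb arr hn y vy hpy
        rw [hpx, hpy] at h
        simp at h
        have : vx = vy := by omega
        rw [this]
  simp [Finset.mem_range] at ha hb
  rcases Nat.lt_or_ge a b with h | h
  · exact ⟨a, b, h, by omega, key a b (by omega) (by omega) hfe⟩
  · exact ⟨b, a, by omega, by omega, key b a (by omega) (by omega) hfe.symm⟩

-- if the walk ever dies, the first death is within len steps
theorem first_none_le (arr : List Int) (hn : 1 ≤ arr.length) (m : Nat)
    (hm : pos arr m = none) (hmin : ∀ k < m, (pos arr k).isSome) : m ≤ arr.length := by
  by_contra h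
  obtain ⟨a, b, hab, _, heq⟩ := pos_pigeonhole arr hn (fun k hk => hmin k (by omega))
  have := pos_all_some_of_repeat arr a b hab heq (hmin a (by omega)) m
  simp [hm] at this

-- period multiples: pos (k + c*(b-a)) = pos k for k ≥ a
theorem pos_period (arr : List Int) (a b : Nat) (hab : a < b) (heq : pos arr a = pos arr b) :
    ∀ c k, a ≤ k → pos arr (k + c * (b - a)) = pos arr k := by
  intro c
  induction c with
  | zero => simp
  | succ c ih =>
    intro k hk
    have h1 : pos arr (k + (b - a)) = pos arr k := by
      have := pos_shift arr a b heq (k - a)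
      have e1 : a + (k - a) = k := by omega
      have e2 : b + (k - a) = k + (b - a) := by omega
      rw [e1, e2] at this
      exact this.symm
    have e3 : k + (c+1) * (b - a) = (k + (b - a)) + c * (b - a) := by ring
    rw [e3, ih (k + (b - a)) (by omega), h1]

def pvMeet (arr : List Int) (t : Nat) : Prop :=
  pos arr (2*t+1) = pos arr t ∨ pos arr (2*t+2) = pos arr t ∨ pos arr (2*t+2) = pos arr (t+1)

theorem exists_meet (arr : List Int) (a b : Nat) (hab : a < b) (hb : b ≤ arr.length)
    (heq : pos arr a = pos arr b) :
    ∃ t, t < (arr.length + 1) * (arr.length + 1) ∧ pvMeet arr t := by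
  refine ⟨(b - a) * (a + 1) - 1, ?_, ?_⟩
  · have h1 : (b - a) * (a + 1) ≤ arr.length * arr.length :=
      Nat.mul_le_mul (by omega) (by omega)
    have h2 : arr.length * arr.length < (arr.length + 1) * (arr.length + 1) := by nlinarith
    omega
  · left
    have hpos : 1 ≤ (b - a) * (a + 1) :=
      Nat.one_le_iff_ne_zero.mpr (Nat.mul_ne_zero (by omega) (by omega))
    have hge : a + 1 ≤ (b - a) * (a + 1) := Nat.le_mul_of_pos_left (a+1) (by omega)
    have ht1 : 2 * ((b - a) * (a + 1) - 1) + 1 =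
        ((b - a) * (a + 1) - 1) + (a + 1) * (b - a) := by
      have e : (b - a) * (a + 1) = (a + 1) * (b - a) := by ring
      omega
    rw [ht1]
    exact pos_period arr a b hab heq (a + 1) ((b - a) * (a + 1) - 1) (by omega)

-- ===== A-loop lemmas =====

theorem aLoop_true (arr : List Int) (hn : 1 ≤ arr.length)
    (hall : ∀ k, (pos arr k).isSome) :
    ∀ f s p q, pos arr (2*s) = some p → pos arr s = some q →
      (∃ t, s ≤ t ∧ t < s + f ∧ pvMeet arr t) →
      aLoop arr (arr.length : Int) f p q = true := by
  intro f
  induction f with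
  | zero => intro s p q _ _ ⟨t, h1, h2, _⟩; omega
  | succ f ih =>
    intro s p q hp hq ⟨t, ht1, ht2, ht3⟩
    have hbp := pos_inb arr hn _ _ hp
    have hbq := pos_inb arr hn _ _ hq
    have h1 := pos_succ_some arr (2*s) p hp (hall _)
    have h2 := pos_succ_some arr (2*s+1) (pyAt arr p) h1.1 (by
      have := hall (2*s+1+1); exact this)
    have h3 := pos_succ_some arr s q hq (hall _)
    rw [aLoop]
    rw [if_pos ⟨hbp.1, hbp.2, hbq.1, hbq.2⟩]
    by_cases e1 : pyAt arr p = q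
    · simp [e1]
      exact hbq
    · rw [if_pos h1.2, if_neg e1]
      by_cases e2 : pyAt arr (pyAt arr p) = q
      · simp [e2]
        exact hbq
      · rw [if_pos h2.2, if_neg e2]
        by_cases e3 : pyAt arr (pyAt arr p) = pyAt arr q
        · simp [e3]
        · rw [if_neg e3]
          -- no meet at s, so the witness t is ≥ s+1
          have hms : ¬ pvMeet arr s := by
            intro hm
            rcases hm with hm | hm | hm
            · rw [h1.1, hq] at hm; exact e1 (by injection hm)
            · rw [show 2*s+2 = (2*s+1)+1 by ring] at hm
              rw [h2.1, hq] at hm; exact e2 (by injection hm)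
            · rw [show 2*s+2 = (2*s+1)+1 by ring] at hm
              rw [h2.1, h3.1] at hm; exact e3 (by injection hm)
          have hts : s ≠ t := fun h => hms (h ▸ ht3)
          apply ih (s+1)
          · rw [show 2*(s+1) = (2*s+1)+1 by ring]; exact h2.1
          · exact h3.1
          · exact ⟨t, by omega, by omega, ht3⟩

theorem aLoop_false (arr : List Int) (hn : 1 ≤ arr.length) (m : Nat)
    (hm : pos arr m = none) (hmin : ∀ k < m, (pos arr k).isSome) :
    ∀ f s p q, pos arr (2*s) = some p → pos arr s = some q → m < 2*s + 2*f →
      aLoop arr (arr.length : Int) f p q = false := by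
  intro f
  induction f with
  | zero =>
    intro s p q hp _ hmf
    have := pos_lt_of_some arr (2*s) m hm (by simp [hp])
    omega
  | succ f ih =>
    intro s p q hp hq hmf
    have hbp := pos_inb arr hn _ _ hp
    have hbq := pos_inb arr hn _ _ hq
    rw [aLoop, if_pos ⟨hbp.1, hbp.2, hbq.1, hbq.2⟩]
    cases hp1 : pos arr (2*s+1) with
    | none =>
      have := pos_succ_none arr (2*s) p hp hp1
      rw [if_neg this]
    | some v1 =>
      have h1 := pos_succ_some arr (2*s) p hp (by simp [hp1])
      rw [if_pos h1.2]
      have e1 : pyAt arr p ≠ q := by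
        intro e
        exact pos_inj arr m hm s (2*s+1)
          q (by omega) hq (by rw [h1.1, e])
      rw [if_neg e1]
      cases hp2 : pos arr (2*s+1+1) with
      | none =>
        have := pos_succ_none arr (2*s+1) (pyAt arr p) h1.1 hp2
        rw [if_neg this]
      | some v2 =>
        have h2 := pos_succ_some arr (2*s+1) (pyAt arr p) h1.1 (by simp [hp2])
        rw [if_pos h2.2]
        have e2 : pyAt arr (pyAt arr p) ≠ q := by
          intro e
          exact pos_inj arr m hm s (2*s+1+1) q (by omega) hq (by rw [h2.1, e])
        rw [if_neg e2]
        have hs1 : (pos arr (s+1)).isSome := by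
          apply hmin
          have := pos_lt_of_some arr (2*s+1+1) m hm (by simp [hp2])
          omega
        have h3 := pos_succ_some arr s q hq hs1
        have e3 : pyAt arr (pyAt arr p) ≠ pyAt arr q := by
          intro e
          exact pos_inj arr m hm (s+1) (2*s+1+1) (pyAt arr q) (by omega) h3.1
            (by rw [h2.1, e])
        rw [if_neg e3]
        apply ih (s+1)
        · rw [show 2*(s+1) = 2*s+1+1 by ring]; exact h2.1
        · exact h3.1
        · omega

-- ===== B-loop lemmas =====

def seenInv (arr : List Int) (seen : List Int) (k : Nat) : Prop :=
  ∀ v, v ∈ seen ↔ ∃ u, u < k ∧ pos arr u = some v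

theorem bLoop_false (arr : List Int) (hn : 1 ≤ arr.length) (m : Nat)
    (hm : pos arr m = none) (hmin : ∀ k < m, (pos arr k).isSome) :
    ∀ f k seen cur, pos arr k = some cur → seenInv arr seen k → m < k + f →
      bLoop arr (arr.length : Int) f seen cur = false := by
  intro f
  induction f with
  | zero =>
    intro k seen cur hk _ hmf
    have := pos_lt_of_some arr k m hm (by simp [hk])
    omega
  | succ f ih =>
    intro k seen cur hk hinv hmf
    have hkm := pos_lt_of_some arr k m hm (by simp [hk])
    have hb := pos_inb arr hn _ _ hk
    rw [bLoop, if_neg (not_not_intro hb)]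
    have hnotmem : cur ∉ seen := by
      intro hmem
      obtain ⟨u, hu, hpu⟩ := (hinv cur).1 hmem
      exact pos_inj arr m hm u k cur hu hpu hk
    rw [if_neg (by simpa [PySem.Set.contains_iff] using hnotmem)]
    have hinv' : seenInv arr (PySem.Set.add seen cur) (k+1) := by
      intro v
      rw [PySem.Set.mem_add]
      constructor
      · rintro (h | rfl)
        · obtain ⟨u, hu, hpu⟩ := (hinv v).1 h; exact ⟨u, by omega, hpu⟩
        · exact ⟨k, by omega, hk⟩
      · rintro ⟨u, hu, hpu⟩
        rcases Nat.lt_or_ge u k with h | h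
        · exact Or.inl ((hinv v).2 ⟨u, h, hpu⟩)
        · have : u = k := by omega
          subst this
          right; rw [hk] at hpu; injection hpu; omega
    cases hk1 : pos arr (k+1) with
    | none =>
      have hnb := pos_succ_none arr k cur hk hk1
      have hm1 : m = k + 1 := by
        by_contra hne
        have := hmin (k+1) (by omega)
        simp [hk1] at this
      -- one more iteration: bounds check on the raw next value fails
      obtain ⟨f', rfl⟩ : ∃ f', f = f' + 1 := ⟨f - 1, by omega⟩
      rw [bLoop, if_pos hnb]
    | some cur' =>
      have h1 := pos_succ_some arr k cur hk (by simp [hk1])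
      rw [show pos arr (k+1) = some (pyAt arr cur) from h1.1] at hk1
      apply ih (k+1) _ _ h1.1 hinv' (by omega)

theorem bLoop_true (arr : List Int) (hn : 1 ≤ arr.length)
    (hall : ∀ k, (pos arr k).isSome) (j : Nat)
    (hj : ∃ i, i < j ∧ pos arr i = pos arr j) :
    ∀ f k seen cur, k ≤ j → pos arr k = some cur → seenInv arr seen k → j < k + f →
      bLoop arr (arr.length : Int) f seen cur = true := by
  intro f
  induction f with
  | zero => intro k seen cur _ _ _ h; omega
  | succ f ih =>
    intro k seen cur hkj hk hinv hjf
    have hb := pos_inb arr hn _ _ hk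
    rw [bLoop, if_neg (not_not_intro hb)]
    by_cases hmem : cur ∈ seen
    · rw [if_pos (by simpa [PySem.Set.contains_iff] using hmem)]
    · rw [if_neg (by simpa [PySem.Set.contains_iff] using hmem)]
      have hklt : k < j := by
        rcases Nat.lt_or_ge k j with h | h
        · exact h
        · exfalso
          have : k = j := by omega
          subst this
          obtain ⟨i, hi, hpi⟩ := hj
          rw [hk] at hpi
          exact hmem ((hinv cur).2 ⟨i, hi, hpi⟩)
      have h1 := pos_succ_some arr k cur hk (hall _)
      have hinv' : seenInv arr (PySem.Set.add seen cur) (k+1) := by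
        intro v
        rw [PySem.Set.mem_add]
        constructor
        · rintro (h | rfl)
          · obtain ⟨u, hu, hpu⟩ := (hinv v).1 h; exact ⟨u, by omega, hpu⟩
          · exact ⟨k, by omega, hk⟩
        · rintro ⟨u, hu, hpu⟩
          rcases Nat.lt_or_ge u k with h | h
          · exact Or.inl ((hinv v).2 ⟨u, h, hpu⟩)
          · have : u = k := by omega
            subst this
            right; rw [hk] at hpu; injection hpu; omega
      exact ih (k+1) _ _ (by omega) h1.1 hinv' (by omega)

-- ===== main equivalence =====

theorem main_equiv (arr : List Int) : check_circular_array arr = check_circular_array_alt arr := by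
  unfold check_circular_array check_circular_array_alt
  by_cases hle : (arr.length : Int) ≤ 1
  · simp [hle]
  · rw [if_neg hle, if_neg hle]
    have hn : 1 ≤ arr.length := by omega
    by_cases hall : ∀ k, (pos arr k).isSome
    · -- cycle: both true
      obtain ⟨a, b, hab, hb, heq⟩ :=
        pos_pigeonhole arr hn (fun k _ => hall k)
      obtain ⟨t, htF, htm⟩ := exists_meet arr a b hab hb heq
      rw [aLoop_true arr hn hall _ 0 0 0 rfl rfl ⟨t, by omega, by omega, htm⟩]
      rw [bLoop_true arr hn hall b ⟨a, hab, heq⟩ _ 0 PySem.Set.empty 0 (by omega) rfl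
        (by intro v; simp [PySem.Set.empty]) (by nlinarith)]
    · -- walk dies: both false
      obtain ⟨m0, hm0⟩ := not_forall.mp hall
      have hex : ∃ m, pos arr m = none := ⟨m0, Option.not_isSome_iff_eq_none.mp hm0⟩
      have hm : pos arr (Nat.find hex) = none := Nat.find_spec hex
      have hmin : ∀ k < Nat.find hex, (pos arr k).isSome := by
        intro k hk
        have := Nat.find_min hex hk
        cases h : pos arr k <;> simp_all
      have hmle : Nat.find hex ≤ arr.length := first_none_le arr hn _ hm hmin
      rw [aLoop_false arr hn _ hm hmin _ 0 0 0 rfl rfl (by nlinarith)]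
      rw [bLoop_false arr hn _ hm hmin _ 0 PySem.Set.empty 0 rfl
        (by intro v; simp [PySem.Set.empty]) (by nlinarith)]

-- ===== VERDICT (by name: the statement is the Claim_ definition above) =====
theorem check_circular_array_spec : Claim_equal_check_circular_array := by
  intro arr _
  unfold Spec_check_circular_array
  exact main_equiv arr
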